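-- pv_equiv track=rewrite | github.com/MarcoFPO/n8n-Workflows | services/ml-analytics-service-modular/advanced_ai_deep_learning_engine_20250820_v2.0.0_20250822.py | extract_market_themes
-- ===== SOURCE A (Python) =====
-- from typing import Dict, List, Any, Optional, Tuple, Union
--
-- def extract_market_themes(tokens: List[str]) -> List[str]:
--     """Extract market themes from tokens"""
--     theme_keywords = {
--         'technology': ['tech', 'ai', 'software', 'cloud', 'digital'],
--         'finance': ['bank', 'credit', 'loan', 'financial', 'fintech'],
--         'energy': ['oil', 'gas', 'renewable', 'solar', 'battery'],
--         'healthcare': ['pharma', 'biotech', 'medical', 'drug', 'vaccine'],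
--         'retail': ['consumer', 'retail', 'shopping', 'ecommerce', 'sales']
--     }
--
--     themes = []
--     for theme, keywords in theme_keywords.items():
--         if any(keyword in tokens for keyword in keywords):
--             themes.append(theme)
--
--     return themes
-- ===== SOURCE B (Python) =====
-- from typing import List
--
-- KEYWORD_THEME = {
--     'tech': 'technology', 'ai': 'technology', 'software': 'technology',
--     'cloud': 'technology', 'digital': 'technology',
--     'bank': 'finance', 'credit': 'finance', 'loan': 'finance',
--     'financial': 'finance', 'fintech': 'finance',
--     'oil': 'energy', 'gas': 'energy', 'renewable': 'energy',
--     'solar': 'energy', 'battery': 'energy',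
--     'pharma': 'healthcare', 'biotech': 'healthcare', 'medical': 'healthcare',
--     'drug': 'healthcare', 'vaccine': 'healthcare',
--     'consumer': 'retail', 'retail': 'retail', 'shopping': 'retail',
--     'ecommerce': 'retail', 'sales': 'retail',
-- }
--
-- THEME_ORDER = ('technology', 'finance', 'energy', 'healthcare', 'retail')
--
-- def extract_market_themes(tokens: List[str]) -> List[str]:
--     """Extract market themes from tokens: one pass over tokens via a flat
--     keyword->theme index, then emit found themes in the canonical order."""
--     found = set()
--     for tok in tokens:
--         theme = KEYWORD_THEME.get(tok)
--         if theme is not None: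
--             found.add(theme)
--     result = []
--     for theme in THEME_ORDER:
--         if theme in found:
--             result.append(theme)
--     return result
-- ===== Notes on version B (the rewrite author's own statement) =====
-- stated objective: faster
-- what changed: Replaced A's per-theme scan of the token list (for each of 5 themes, test each of its 5 keywords with 'keyword in tokens') by a single pass over the tokens through a flat keyword->theme dict, collecting matched themes into a set and then emitting themes in the fixed canonical order.
import Mathlib
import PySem

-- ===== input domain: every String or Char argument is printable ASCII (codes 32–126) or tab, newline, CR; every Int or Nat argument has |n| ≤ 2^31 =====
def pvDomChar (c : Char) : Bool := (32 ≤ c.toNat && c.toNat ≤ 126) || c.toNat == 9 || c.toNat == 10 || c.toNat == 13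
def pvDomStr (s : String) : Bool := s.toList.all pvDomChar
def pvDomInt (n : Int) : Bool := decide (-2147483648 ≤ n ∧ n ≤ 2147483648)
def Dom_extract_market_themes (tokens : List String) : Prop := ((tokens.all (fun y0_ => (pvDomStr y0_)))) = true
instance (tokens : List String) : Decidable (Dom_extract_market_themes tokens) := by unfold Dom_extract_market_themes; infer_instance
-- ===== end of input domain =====

-- B replaces A's per-theme membership scans of the token list by a single pass over the
-- tokens through a flat keyword->theme dict, then emits found themes in canonical order.

-- ===== PORT A =====
-- A's theme_keywords dict literal, as an insertion-ordered assoc list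
def themeKeywords : List (String × List String) :=
  [("technology", ["tech", "ai", "software", "cloud", "digital"]),
   ("finance", ["bank", "credit", "loan", "financial", "fintech"]),
   ("energy", ["oil", "gas", "renewable", "solar", "battery"]),
   ("healthcare", ["pharma", "biotech", "medical", "drug", "vaccine"]),
   ("retail", ["consumer", "retail", "shopping", "ecommerce", "sales"])]

-- A: for each (theme, keywords) item, append theme if any keyword is in tokens
def extract_market_themes (tokens : List String) : List String :=
  themeKeywords.foldl
    (fun themes p => if p.2.any (fun kw => tokens.contains kw) then themes ++ [p.1] else themes) []

-- ===== PORT B =====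
-- B's flat KEYWORD_THEME dict literal
def keywordTheme : PySem.Dict String String :=
  PySem.Dict.ofList
    [("tech","technology"),("ai","technology"),("software","technology"),("cloud","technology"),("digital","technology"),
     ("bank","finance"),("credit","finance"),("loan","finance"),("financial","finance"),("fintech","finance"),
     ("oil","energy"),("gas","energy"),("renewable","energy"),("solar","energy"),("battery","energy"),
     ("pharma","healthcare"),("biotech","healthcare"),("medical","healthcare"),("drug","healthcare"),("vaccine","healthcare"),
     ("consumer","retail"),("retail","retail"),("shopping","retail"),("ecommerce","retail"),("sales","retail")]

def themeOrder : List String := ["technology", "finance", "energy", "healthcare", "retail"]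

-- B's first loop: one pass over the tokens, looking each up in the index
def collectFound : List String → PySem.Set String → PySem.Set String
  | [], found => found
  | tok :: rest, found =>
    match keywordTheme.get? tok with
    | some theme => collectFound rest (found.add theme)
    | none => collectFound rest found

-- B's second loop: keep the canonical themes that were found
def emitInOrder : List String → PySem.Set String → List String
  | [], _ => []
  | th :: rest, found =>
    if found.contains th then th :: emitInOrder rest found else emitInOrder rest found

def extract_market_themes_alt (tokens : List String) : List String :=
  emitInOrder themeOrder (collectFound tokens PySem.Set.empty)

-- ===== PRECONDITION & SPEC =====
def Spec_extract_market_themes (tokens : List String) (out : List String) : Prop := out = extract_market_themes_alt tokens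
instance (tokens : List String) (out : List String) : Decidable (Spec_extract_market_themes tokens out) := by unfold Spec_extract_market_themes; infer_instance

-- ===== CLAIM =====
def Claim_equal_extract_market_themes : Prop := ∀ (tokens : List String), Dom_extract_market_themes tokens → Spec_extract_market_themes tokens (extract_market_themes tokens)

-- ===== LEMMAS AND PROOFS =====

lemma keywordTheme_items : keywordTheme.items =
  [("tech","technology"),("ai","technology"),("software","technology"),("cloud","technology"),("digital","technology"),
   ("bank","finance"),("credit","finance"),("loan","finance"),("financial","finance"),("fintech","finance"),
   ("oil","energy"),("gas","energy"),("renewable","energy"),("solar","energy"),("battery","energy"),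
   ("pharma","healthcare"),("biotech","healthcare"),("medical","healthcare"),("drug","healthcare"),("vaccine","healthcare"),
   ("consumer","retail"),("retail","retail"),("shopping","retail"),("ecommerce","retail"),("sales","retail")] := by decide

lemma keywordTheme_keys_nodup : keywordTheme.keys.Nodup := by decide

lemma get?_keywordTheme_iff (tok th : String) :
    keywordTheme.get? tok = some th ↔ (tok, th) ∈ keywordTheme.items :=
  PySem.Dict.get?_eq_some_iff_mem_items keywordTheme tok th keywordTheme_keys_nodup

-- characterization of the 'found' set B accumulates over the token pass
lemma mem_collectFound (tokens : List String) (s : PySem.Set String) (th : String) :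
    th ∈ collectFound tokens s ↔ th ∈ s ∨ ∃ tok ∈ tokens, keywordTheme.get? tok = some th := by
  induction tokens generalizing s with
  | nil => simp [collectFound]
  | cons tok rest ih =>
    simp only [collectFound]
    cases h : keywordTheme.get? tok with
    | none => simp [h, ih]
    | some theme =>
      simp [h, ih, PySem.Set.mem_add]
      tauto

-- B's ordering loop is a filter over the canonical order
lemma emitInOrder_eq_filter (l : List String) (found : PySem.Set String) :
    emitInOrder l found = l.filter (fun th => found.contains th) := by
  induction l with
  | nil => rfl
  | cons th rest ih => simp only [emitInOrder, List.filter_cons]; split_ifs <;> simp_all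

theorem main_equiv (tokens : List String) : extract_market_themes tokens = extract_market_themes_alt tokens := by
  unfold extract_market_themes extract_market_themes_alt
  rw [PySem.List.foldl_append_if, List.nil_append, emitInOrder_eq_filter]
  have horder : themeOrder = themeKeywords.map Prod.fst := by decide
  rw [horder, List.filter_map]
  apply congrArg (List.map Prod.fst)
  apply List.filter_congr
  intro p hp
  rw [Bool.eq_iff_iff]
  simp only [List.any_eq_true]
  fin_cases hp <;>
    · simp only [Function.comp_apply, PySem.Set.contains_iff]
      rw [mem_collectFound]
      simp [get?_keywordTheme_iff, keywordTheme_items, Prod.ext_iff]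
      aesop

-- ===== VERDICT =====
theorem extract_market_themes_spec : Claim_equal_extract_market_themes := by
  intro tokens _
  exact main_equiv tokens
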